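-- pv_equiv track=rewrite | github.com/Choeseonjeong/Baekjoon | 프로그래머스/2/87946. 피로도/피로도.py | solution
-- ===== SOURCE A (Python) =====
-- import itertools # 모든 조합
--
-- def solution(k, dun):
--     per_dun = list(itertools.permutations(dun))
--     total = []
--
--     for dun in per_dun:
--         num = 0
--         k_copy = k
--         for need_stress, stress in dun:
--             if k_copy < need_stress:
--                 break
--             else:
--                 k_copy -= stress
--                 num += 1
--         total.append(num)
--     return max(total)
-- ===== SOURCE B (Python) =====
-- def solution(k, dun):
--     # Recursive DFS/backtracking: try each still-available dungeon whose
--     # requirement is met, take the best continuation; never materializes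
--     # permutations and prunes unclearable branches early.
--     def best(fatigue, remaining):
--         result = 0
--         for i, (need, stress) in enumerate(remaining):
--             if need <= fatigue:
--                 rest = remaining[:i] + remaining[i + 1:]
--                 result = max(result, 1 + best(fatigue - stress, rest))
--         return result
--     return best(k, list(dun))
-- ===== Notes on version B (the rewrite author's own statement) =====
-- stated objective: alternative
-- what changed: B replaces A's materialize-all-n!-permutations-and-score-each pass with a recursive DFS/backtracking over the remaining dungeons that prunes any branch whose next dungeon is not clearable.
import Mathlib
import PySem

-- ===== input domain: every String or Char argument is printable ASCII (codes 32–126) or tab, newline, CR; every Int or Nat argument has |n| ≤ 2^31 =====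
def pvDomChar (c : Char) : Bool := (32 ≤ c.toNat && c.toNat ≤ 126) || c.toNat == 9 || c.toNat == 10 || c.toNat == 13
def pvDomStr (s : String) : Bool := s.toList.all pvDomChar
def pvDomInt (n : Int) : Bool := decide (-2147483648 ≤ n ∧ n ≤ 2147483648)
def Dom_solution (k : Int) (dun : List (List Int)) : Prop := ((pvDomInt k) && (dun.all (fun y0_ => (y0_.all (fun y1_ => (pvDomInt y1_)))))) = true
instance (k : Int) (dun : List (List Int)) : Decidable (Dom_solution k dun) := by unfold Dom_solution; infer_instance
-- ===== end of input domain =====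

-- B replaces A's "materialize every permutation, score each, take max" with a
-- recursive DFS/backtracking over the still-available dungeons that prunes
-- unclearable branches early instead of scoring every ordering (objective: alternative).

-- ===== PORT A =====
-- helper shared by both ports' index-removal step: all (element, rest-without-it) pairs, in index order
def pvPicks (l : List (List Int)) : List (List Int × List (List Int)) :=
  match l with
  | [] => []
  | x :: xs => (x, xs) :: (pvPicks xs).map (fun p => (p.1, x :: p.2))

-- needed by the ports' termination proofs
theorem pvPicks_length : ∀ (l : List (List Int)) (p : List Int × List (List Int)),
    p ∈ pvPicks l → p.2.length + 1 = l.length := by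
  intro l
  induction l with
  | nil => intro p h; simp [pvPicks] at h
  | cons x xs ih =>
    intro p h
    simp only [pvPicks, List.mem_cons, List.mem_map] at h
    rcases h with h | ⟨q, hq, rfl⟩
    · subst h; simp
    · have := ih q hq; simp; omega

-- itertools.permutations, in Python's order (first element runs over the indices)
def pvPerms (l : List (List Int)) : List (List (List Int)) :=
  match l with
  | [] => [[]]
  | x :: xs =>
    (pvPicks (x :: xs)).attach.flatMap (fun p => (pvPerms p.1.2).map (p.1.1 :: ·))
termination_by l.length
decreasing_by
  have := pvPicks_length _ _ p.2; omega

-- the inner for-loop of A: clearable-prefix score of one ordering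
def pvScore (k : Int) : List (List Int) → Int
  | [] => 0
  | d :: rest =>
    match d with
    | [need, stress] => if k < need then 0 else 1 + pvScore (k - stress) rest
    | _ => 0   -- unreachable under Pre_ (Python raises on a row that is not a pair)

def solution (k : Int) (dun : List (List Int)) : Int :=
  ((PySem.List.max? ((pvPerms dun).map (pvScore k)) (fun x => x)).getD 0)
  -- total is always nonempty (pvPerms [] = [[]]), so Python's max never raises; getD 0 is never taken

-- ===== PORT B =====
-- DFS: best number of clears from fatigue k with the given dungeons remaining
def pvBest (k : Int) (rem : List (List Int)) : Int :=
  (pvPicks rem).attach.foldl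
    (fun result p =>
      match p.1.1 with
      | [need, stress] =>
        if need ≤ k then max result (1 + pvBest (k - stress) p.1.2) else result
      | _ => result)   -- unreachable under Pre_
    0
termination_by rem.length
decreasing_by
  have := pvPicks_length _ _ p.2; omega

def solution_alt (k : Int) (dun : List (List Int)) : Int := pvBest k dun

-- ===== PRECONDITION & SPEC =====
-- Pre_ excludes rows that are not two-element lists, on which Python A raises ValueError while unpacking
def Pre_solution (k : Int) (dun : List (List Int)) : Prop := ∀ d ∈ dun, d.length = 2
instance (k : Int) (dun : List (List Int)) : Decidable (Pre_solution k dun) := by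
  unfold Pre_solution; infer_instance
def pvWitness_solution : Int × List (List Int) := (80, [[80, 20], [50, 40], [30, 10]])

def Spec_solution (k : Int) (dun : List (List Int)) (out : Int) : Prop := out = solution_alt k dun
instance (k : Int) (dun : List (List Int)) (out : Int) : Decidable (Spec_solution k dun out) := by
  unfold Spec_solution; infer_instance

-- ===== CLAIM (what is proved, stated in full; the proofs are below) =====
def Claim_equal_solution : Prop := ∀ (k : Int) (dun : List (List Int)), Dom_solution k dun → Pre_solution k dun → Spec_solution k dun (solution k dun)

-- ===== LEMMAS AND PROOFS =====

theorem pvScore_nonneg : ∀ (p : List (List Int)) (k : Int), 0 ≤ pvScore k p := by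
  intro p
  induction p with
  | nil => intro k; simp [pvScore]
  | cons d rest ih =>
    intro k
    match d with
    | [need, stress] =>
      simp only [pvScore]
      split
      · exact le_refl 0
      · have := ih (k - stress); omega
    | [] => simp [pvScore]
    | [a] => simp [pvScore]
    | a :: b :: c :: t => simp [pvScore]

theorem pvPerms_ne_nil : ∀ (n : Nat) (l : List (List Int)), l.length ≤ n → pvPerms l ≠ [] := by
  intro n
  induction n with
  | zero =>
    intro l h
    have : l = [] := List.eq_nil_of_length_eq_zero (by omega)
    subst this; simp [pvPerms]
  | succ n ih =>
    intro l h
    match l with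
    | [] => simp [pvPerms]
    | x :: xs =>
      have hx : pvPerms xs ≠ [] := ih xs (by simp at h; omega)
      obtain ⟨q, hq⟩ := List.exists_mem_of_ne_nil _ hx
      have hmem : (x :: q) ∈ pvPerms (x :: xs) := by
        rw [pvPerms]
        exact List.mem_flatMap.mpr
          ⟨⟨(x, xs), by simp [pvPicks]⟩, List.mem_attach _ _, List.mem_map.mpr ⟨q, hq, rfl⟩⟩
      exact List.ne_nil_of_mem hmem

theorem pvPicks_mem_sub : ∀ (l : List (List Int)) (p : List Int × List (List Int)),
    p ∈ pvPicks l → p.1 ∈ l ∧ ∀ d ∈ p.2, d ∈ l := by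
  intro l
  induction l with
  | nil => intro p h; simp [pvPicks] at h
  | cons x xs ih =>
    intro p h
    simp only [pvPicks, List.mem_cons, List.mem_map] at h
    rcases h with h | ⟨q, hq, rfl⟩
    · subst h; exact ⟨by simp, fun d hd => by simp [hd]⟩
    · obtain ⟨h1, h2⟩ := ih q hq
      refine ⟨by simp [h1], fun d hd => ?_⟩
      simp only [List.mem_cons] at hd ⊢
      rcases hd with rfl | hd
      · exact Or.inl rfl
      · exact Or.inr (h2 d hd)

-- foldl max over a flatMap folds block by block
theorem pv_foldl_max_flatMap {α : Type} (g : α → List Int) :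
    ∀ (ps : List α) (a : Int),
      List.foldl max a (ps.flatMap g) = ps.foldl (fun a p => List.foldl max a (g p)) a := by
  intro ps
  induction ps with
  | nil => intro a; simp
  | cons p t ih => intro a; simp [List.foldl_append, ih]

-- a max-fold's start value can be pulled out of the fold
theorem pv_foldl_max_pull {β : Type} (s : β → Int) :
    ∀ (qs : List β) (a c : Int),
      List.foldl (fun x q => max x (s q)) (max a c) qs
        = max a (List.foldl (fun x q => max x (s q)) c qs) := by
  intro qs
  induction qs with
  | nil => intro a c; simp
  | cons q t ih =>
    intro a c
    simp only [List.foldl_cons]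
    rw [max_assoc, ih]

-- shifting every element of a max-fold by 1 shifts the (nonneg) result by 1
theorem pv_foldl_max_shift {β : Type} (s : β → Int) :
    ∀ (qs : List β) (b : Int), qs ≠ [] → (∀ q ∈ qs, 0 ≤ s q) →
      List.foldl max b (qs.map (fun q => 1 + s q))
        = max b (1 + List.foldl max 0 (qs.map s)) := by
  intro qs
  induction qs with
  | nil => intro b h; exact absurd rfl h
  | cons q t ih =>
    intro b _ hnn
    by_cases ht : t = []
    · subst ht
      have h0 : 0 ≤ s q := hnn q (by simp)
      simp only [List.map_cons, List.map_nil, List.foldl_cons, List.foldl_nil]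
      omega
    · have h0 : 0 ≤ s q := hnn q (by simp)
      simp only [List.map_cons, List.foldl_cons]
      rw [ih (max b (1 + s q)) ht (fun x hx => hnn x (by simp [hx]))]
      have hpull := pv_foldl_max_pull s t (s q) 0
      have hconv : List.foldl max (max (s q) 0) (t.map s)
          = List.foldl (fun x p => max x (s p)) (max (s q) 0) t := by
        rw [List.foldl_map]
      have hconv0 : List.foldl max (0 : Int) (t.map s)
          = List.foldl (fun x p => max x (s p)) (0 : Int) t := by
        rw [List.foldl_map]
      rw [max_comm (0 : Int) (s q), hconv, hpull, ← hconv0]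
      generalize List.foldl max (0 : Int) (t.map s) = T
      omega

-- a fold over all-zero blocks keeps a nonnegative accumulator
theorem pv_foldl_max_zero {β : Type} :
    ∀ (qs : List β) (b : Int), 0 ≤ b →
      List.foldl max b (qs.map (fun _ => (0 : Int))) = b := by
  intro qs
  induction qs with
  | nil => intro b _; simp
  | cons q t ih =>
    intro b hb
    simp only [List.map_cons, List.foldl_cons]
    rw [max_eq_left hb]
    exact ih b hb

-- two folds agree when their steps agree on members and preserve nonnegativity
theorem pv_foldl_inv {α : Type} :
    ∀ (ps : List α) (f g : Int → α → Int) (a : Int), 0 ≤ a →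
      (∀ b p, p ∈ ps → 0 ≤ b → f b p = g b p ∧ 0 ≤ g b p) →
      ps.foldl f a = ps.foldl g a := by
  intro ps
  induction ps with
  | nil => intro f g a _ _; simp
  | cons p t ih =>
    intro f g a ha hfg
    obtain ⟨he, hnn⟩ := hfg a p (by simp) ha
    simp only [List.foldl_cons, he]
    exact ih f g (g a p) hnn (fun b x hx hb => hfg b x (by simp [hx]) hb)

-- main induction: A's max-over-permutations fold equals B's DFS
theorem pv_main : ∀ (n : Nat) (l : List (List Int)), l.length ≤ n → (∀ d ∈ l, d.length = 2) →
    ∀ k, List.foldl max 0 ((pvPerms l).map (pvScore k)) = pvBest k l := by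
  intro n
  induction n with
  | zero =>
    intro l h _ k
    have : l = [] := List.eq_nil_of_length_eq_zero (by omega)
    subst this
    rw [pvPerms, pvBest]
    simp [pvScore, pvPicks]
  | succ n ih =>
    intro l hlen hrows k
    match l with
    | [] =>
      rw [pvPerms, pvBest]
      simp [pvScore, pvPicks]
    | x :: xs =>
      rw [pvPerms, pvBest, List.map_flatMap, pv_foldl_max_flatMap]
      refine pv_foldl_inv _ _ _ 0 le_rfl ?_
      rintro b ⟨⟨d, rest⟩, hp⟩ _ hb
      have hlen2 : rest.length + 1 = (x :: xs).length := pvPicks_length _ _ hp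
      have hsub := pvPicks_mem_sub _ _ hp
      have hrest : ∀ e ∈ rest, e.length = 2 := fun e he => hrows e (hsub.2 e he)
      have hd2 : d.length = 2 := hrows d hsub.1
      match d, hd2 with
      | [need, stress], _ =>
        simp only [List.map_map]
        have hscore : ∀ q : List (List Int),
            pvScore k ([need, stress] :: q)
              = if k < need then 0 else 1 + pvScore (k - stress) q := by
          intro q; rfl
        by_cases hc : k < need
        · have hmape : ((pvPerms rest).map (pvScore k ∘ ([need, stress] :: ·)))
              = (pvPerms rest).map (fun _ => (0 : Int)) := by
            refine List.map_congr_left (fun q _ => ?_)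
            simp [Function.comp, hscore, hc]
          rw [hmape, pv_foldl_max_zero _ b hb]
          rw [if_neg (by omega)]
          exact ⟨rfl, hb⟩
        · have hmape : ((pvPerms rest).map (pvScore k ∘ ([need, stress] :: ·)))
              = (pvPerms rest).map (fun q => 1 + pvScore (k - stress) q) := by
            refine List.map_congr_left (fun q _ => ?_)
            simp [Function.comp, hscore, hc]
          rw [hmape,
            pv_foldl_max_shift _ _ b (pvPerms_ne_nil rest.length rest le_rfl)
              (fun q _ => pvScore_nonneg q _)]
          rw [ih rest (by simp only [List.length_cons] at hlen2 hlen; omega) hrest (k - stress)]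
          rw [if_pos (by omega)]
          refine ⟨rfl, ?_⟩
          have := pvScore_nonneg ([] : List (List Int)) 0
          omega

-- ===== VERDICT (by name: the statement is the Claim_ definition above) =====
theorem solution_spec : Claim_equal_solution := by
  intro k dun _ hpre
  unfold Spec_solution solution solution_alt
  have hmain := pv_main dun.length dun le_rfl hpre k
  have hne : (pvPerms dun).map (pvScore k) ≠ [] := by
    simp only [ne_eq, List.map_eq_nil_iff]
    exact pvPerms_ne_nil dun.length dun le_rfl
  obtain ⟨y, t, hyt⟩ := List.exists_cons_of_ne_nil hne
  have hy0 : 0 ≤ y := by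
    have hmem : y ∈ (pvPerms dun).map (pvScore k) := by rw [hyt]; simp
    obtain ⟨q, _, rfl⟩ := List.mem_map.mp hmem
    exact pvScore_nonneg q k
  rw [hyt] at hmain ⊢
  rw [PySem.List.max?_id_cons]
  simp only [Option.getD_some]
  rw [← hmain]
  simp only [List.foldl_cons]
  rw [max_eq_right hy0]
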